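-- pv_equiv track=rewrite | github.com/AlexEneas/Baseline | MixedinKey/mik_sync_tags_from_files.py | map_db_columns
-- ===== SOURCE A (Python) =====
-- from typing import Any, Dict, List, Optional, Tuple
--
-- COLUMN_CANDIDATES = {
--     "artist": ["artist", "artists", "artistname", "artist_name"],
--     "title": ["title", "track", "tracktitle", "track_title", "name"],
--     "album": ["album", "release", "albumtitle", "album_title"],
--     "genre": ["genre", "genres", "style"],
--     "bpm": ["bpm", "tempo"],
--     "key": ["key", "initialkey", "initial_key", "camelot", "musickey"],
--     "year": ["year", "date"],
-- }
--
-- def map_db_columns(cols: List[str]) -> Dict[str, str]: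
--     """
--     Returns mapping from canonical field name -> actual DB column name
--     Only includes fields that exist in DB.
--     """
--     lower_to_actual = {c.lower(): c for c in cols}
--     mapped: Dict[str, str] = {}
--
--     for field, candidates in COLUMN_CANDIDATES.items():
--         for cand in candidates:
--             if cand.lower() in lower_to_actual:
--                 mapped[field] = lower_to_actual[cand.lower()]
--                 break
--     return mapped
-- ===== SOURCE B (Python) =====
-- from typing import Dict, List, Optional, Tuple
--
-- COLUMN_CANDIDATES = {
--     "artist": ["artist", "artists", "artistname", "artist_name"],
--     "title": ["title", "track", "tracktitle", "track_title", "name"],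
--     "album": ["album", "release", "albumtitle", "album_title"],
--     "genre": ["genre", "genres", "style"],
--     "bpm": ["bpm", "tempo"],
--     "key": ["key", "initialkey", "initial_key", "camelot", "musickey"],
--     "year": ["year", "date"],
-- }
--
--
-- def _best_column(cols: List[str], candidates: List[str]) -> Optional[str]:
--     """Single pass over cols keeping the column whose lowercase form is the
--     highest-priority candidate; on equal priority the later column wins."""
--     prio = {c: i for i, c in enumerate(candidates)}
--     best: Optional[Tuple[int, str]] = None
--     for col in cols:
--         i = prio.get(col.lower())
--         if i is not None and (best is None or i <= best[0]):
--             best = (i, col)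
--     return best[1] if best is not None else None
--
--
-- def map_db_columns(cols: List[str]) -> Dict[str, str]:
--     mapped: Dict[str, str] = {}
--     for field, candidates in COLUMN_CANDIDATES.items():
--         col = _best_column(cols, candidates)
--         if col is not None:
--             mapped[field] = col
--     return mapped
-- ===== Notes on version B (the rewrite author's own statement) =====
-- stated objective: alternative
-- what changed: Instead of building a global lowercase->actual column dict and then scanning each field's candidate list with a break, B makes one pass over cols per field, keeping only a (priority-index, column) accumulator: the column with the smallest candidate index wins, later columns win ties (<=), so no global index dict is built and the candidate scan disappears.
import Mathlib
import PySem

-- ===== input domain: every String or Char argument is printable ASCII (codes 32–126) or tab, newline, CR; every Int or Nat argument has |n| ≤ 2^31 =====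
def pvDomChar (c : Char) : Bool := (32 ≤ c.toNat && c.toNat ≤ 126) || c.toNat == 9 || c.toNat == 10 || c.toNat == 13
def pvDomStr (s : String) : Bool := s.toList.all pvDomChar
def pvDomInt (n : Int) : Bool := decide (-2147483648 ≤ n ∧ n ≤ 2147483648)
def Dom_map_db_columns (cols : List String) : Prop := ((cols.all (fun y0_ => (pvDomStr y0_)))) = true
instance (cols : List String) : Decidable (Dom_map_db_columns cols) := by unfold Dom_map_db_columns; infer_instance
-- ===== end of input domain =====

-- B replaces A's global lowercase→column dict + per-field candidate scan with one pass over
-- cols per field keeping a (priority-index, column) accumulator (alternative decomposition).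

-- module-level constant COLUMN_CANDIDATES (dict → association list), shared by both programs
def pvCands : List (String × List String) :=
  [("artist", ["artist", "artists", "artistname", "artist_name"]),
   ("title",  ["title", "track", "tracktitle", "track_title", "name"]),
   ("album",  ["album", "release", "albumtitle", "album_title"]),
   ("genre",  ["genre", "genres", "style"]),
   ("bpm",    ["bpm", "tempo"]),
   ("key",    ["key", "initialkey", "initial_key", "camelot", "musickey"]),
   ("year",   ["year", "date"])]

-- ===== PORT A =====
-- A's inner `for cand in candidates: if cand.lower() in lower_to_actual: …; break`
def pvFindCand (d : PySem.Dict String String) : List String → Option String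
  | [] => none
  | cand :: rest =>
    match d.get? (PySem.Str.lower cand) with
    | some v => some v
    | none => pvFindCand d rest

def map_db_columns (cols : List String) : List (String × String) :=
  let lta := cols.foldl (fun d c => d.insert (PySem.Str.lower c) c) PySem.Dict.empty
  (pvCands.foldl (fun mapped fc =>
    match pvFindCand lta fc.2 with
    | some v => mapped.insert fc.1 v
    | none => mapped) PySem.Dict.empty).items

-- ===== PORT B =====
-- Source B's _best_column: priority dict from the candidate list, then one fold over cols
def pvBestColumn (cols : List String) (candidates : List String) : Option String :=
  let prio := (PySem.List.enumerate candidates).foldl (fun d p => d.insert p.2 p.1) PySem.Dict.empty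
  let best := cols.foldl (fun b col =>
    match prio.get? (PySem.Str.lower col) with
    | none => b
    | some i =>
      match b with
      | none => some (i, col)
      | some p => if i ≤ p.1 then some (i, col) else b) none
  best.map (·.2)

def map_db_columns_alt (cols : List String) : List (String × String) :=
  (pvCands.foldl (fun mapped fc =>
    match pvBestColumn cols fc.2 with
    | some v => mapped.insert fc.1 v
    | none => mapped) PySem.Dict.empty).items

-- ===== PRECONDITION & SPEC =====
def Spec_map_db_columns (cols : List String) (out : List (String × String)) : Prop := out = map_db_columns_alt cols
instance (cols : List String) (out : List (String × String)) : Decidable (Spec_map_db_columns cols out) := by unfold Spec_map_db_columns; infer_instance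

-- ===== CLAIM (what is proved, stated in full; the proofs are below) =====
def Claim_equal_map_db_columns : Prop := ∀ (cols : List String), Dom_map_db_columns cols → Spec_map_db_columns cols (map_db_columns cols)

-- ===== LEMMAS AND PROOFS =====

-- first index (counting from i) of s in the list, none if absent
def pvPos? (i : Int) : List String → String → Option Int
  | [], _ => none
  | x :: r, s => if x == s then some i else pvPos? (i + 1) r s

-- first candidate (with its index, counting from i) present as a key of d, with d's value
def pvBestIdx (d : PySem.Dict String String) (i : Int) : List String → Option (Int × String)
  | [] => none
  | c :: rest =>
    match d.get? c with
    | some v => some (i, v)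
    | none => pvBestIdx d (i + 1) rest

lemma pvPos?_ge (l : List String) : ∀ (i k : Int) (s : String), pvPos? i l s = some k → i ≤ k := by
  induction l with
  | nil => intro i k s h; simp [pvPos?] at h
  | cons x r ih =>
    intro i k s h
    by_cases hx : x == s
    · simp [pvPos?, hx] at h; omega
    · simp [pvPos?, hx] at h
      have := ih (i + 1) k s h; omega

lemma pvBestIdx_ge (l : List String) : ∀ (i : Int) (d : PySem.Dict String String) (p : Int × String),
    pvBestIdx d i l = some p → i ≤ p.1 := by
  induction l with
  | nil => intro i d p h; simp [pvBestIdx] at h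
  | cons c rest ih =>
    intro i d p h
    simp only [pvBestIdx] at h
    cases hg : d.get? c with
    | some v =>
      rw [hg] at h
      obtain ⟨p1, p2⟩ := p
      simp only [Option.some.injEq, Prod.mk.injEq] at h
      omega
    | none => rw [hg] at h; have := ih (i + 1) d p h; omega

lemma pvBestIdx_empty (l : List String) : ∀ (i : Int),
    pvBestIdx PySem.Dict.empty i l = none := by
  induction l with
  | nil => intro i; rfl
  | cons c rest ih => intro i; simp [pvBestIdx, PySem.Dict.get?_empty, ih]

lemma pvPos?_not_mem (s : String) (l : List String) (h : s ∉ l) : ∀ i, pvPos? i l s = none := by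
  induction l with
  | nil => intro i; rfl
  | cons x r ih =>
    intro i
    simp only [List.mem_cons, not_or] at h
    have hx : (x == s) = false := beq_eq_false_iff_ne.mpr (fun hh => h.1 hh.symm)
    simp only [pvPos?, hx, Bool.false_eq_true, if_false]
    exact ih h.2 (i + 1)

-- lookup in the priority dict built from the enumerate fold = first position in the list
lemma prio_get? (l : List String) : ∀ (i : Int) (d : PySem.Dict String Int) (s : String),
    l.Nodup →
    ((PySem.List.enumerate l i).foldl (fun d p => d.insert p.2 p.1) d).get? s
      = (match pvPos? i l s with
         | some k => some k
         | none => d.get? s) := by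
  induction l with
  | nil => intro i d s _; rfl
  | cons x r ih =>
    intro i d s hnd
    have hnd' := hnd.of_cons
    have hx : x ∉ r := (List.nodup_cons.mp hnd).1
    rw [show PySem.List.enumerate (x :: r) i = (i, x) :: PySem.List.enumerate r (i + 1) by
      simp [PySem.List.enumerate]]
    rw [List.foldl_cons, ih (i + 1) (d.insert x i) s hnd']
    by_cases hs : x = s
    · subst hs
      rw [pvPos?_not_mem x r hx (i + 1)]
      simp [pvPos?, PySem.Dict.get?_insert_self]
    · have : pvPos? i (x :: r) s = pvPos? (i + 1) r s := by
        simp [pvPos?, hs]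
      rw [this]
      cases hp : pvPos? (i + 1) r s with
      | some k => simp
      | none => simp [PySem.Dict.get?_insert_of_ne _ _ (fun h => hs h.symm)]

-- the effect of one more column (key s, value c) on the best-candidate scan
lemma step_insert (s c : String) (l : List String) : ∀ (i : Int) (d : PySem.Dict String String),
    (match pvPos? i l s with
     | none => pvBestIdx d i l
     | some k =>
       match pvBestIdx d i l with
       | none => some (k, c)
       | some p => if k ≤ p.1 then some (k, c) else pvBestIdx d i l)
    = pvBestIdx (d.insert s c) i l := by
  induction l with
  | nil => intro i d; rfl
  | cons x r ih =>
    intro i d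
    by_cases hs : x = s
    · subst hs
      have hget : (d.insert x c).get? x = some c := PySem.Dict.get?_insert_self d x c
      simp only [pvPos?, beq_self_eq_true, if_true, pvBestIdx, hget]
      cases hg : d.get? x with
      | some v => simp
      | none =>
        cases hb : pvBestIdx d (i + 1) r with
        | none => simp
        | some p =>
          have := pvBestIdx_ge r (i + 1) d p hb
          simp [show i ≤ p.1 by omega]
    · have hx : (x == s) = false := by simp [hs]
      have hget : (d.insert s c).get? x = d.get? x :=
        PySem.Dict.get?_insert_of_ne d c hs
      simp only [pvPos?, hx, Bool.false_eq_true, if_false, pvBestIdx, hget]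
      cases hg : d.get? x with
      | some v =>
        cases hp : pvPos? (i + 1) r s with
        | none => simp
        | some k =>
          have := pvPos?_ge r (i + 1) k s hp
          simp [show ¬ k ≤ i by omega]
      | none => exact ih (i + 1) d

-- B's per-field pass over cols equals A's candidate scan over A's lowercase→actual dict
lemma bestColumn_eq_findCand (cands : List String)
    (hl : cands.map PySem.Str.lower = cands) (hnd : cands.Nodup) (cols : List String) :
    pvBestColumn cols cands
      = pvFindCand (cols.foldl (fun d c => d.insert (PySem.Str.lower c) c) PySem.Dict.empty) cands := by
  have hprio : ∀ s, ((PySem.List.enumerate cands).foldl (fun d p => d.insert p.2 p.1)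
      PySem.Dict.empty).get? s = pvPos? 0 cands s := by
    intro s
    rw [prio_get? cands 0 PySem.Dict.empty s hnd]
    cases hp : pvPos? 0 cands s with
    | some k => simp
    | none => simp [PySem.Dict.get?_empty]
  have hfold : ∀ cols' : List String, cols'.foldl (fun b col =>
      match ((PySem.List.enumerate cands).foldl (fun d p => d.insert p.2 p.1)
        PySem.Dict.empty).get? (PySem.Str.lower col) with
      | none => b
      | some i =>
        match b with
        | none => some (i, col)
        | some p => if i ≤ p.1 then some (i, col) else b) none
      = pvBestIdx (cols'.foldl (fun d c => d.insert (PySem.Str.lower c) c) PySem.Dict.empty)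
          0 cands := by
    intro cols'
    induction cols' using List.reverseRecOn with
    | nil => simp [pvBestIdx_empty]
    | append_singleton cs c ihc =>
      rw [List.foldl_append, List.foldl_append, List.foldl_cons, List.foldl_nil,
        List.foldl_cons, List.foldl_nil, ihc, hprio (PySem.Str.lower c),
        ← step_insert (PySem.Str.lower c) c cands 0
          (cs.foldl (fun d c => d.insert (PySem.Str.lower c) c) PySem.Dict.empty)]
  have hfind : ∀ (l : List String) (i : Int) (d : PySem.Dict String String),
      (pvBestIdx d i (l.map PySem.Str.lower)).map (·.2) = pvFindCand d l := by
    intro l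
    induction l with
    | nil => intro i d; rfl
    | cons x r ih =>
      intro i d
      simp only [List.map_cons, pvBestIdx, pvFindCand]
      cases hg : d.get? (PySem.Str.lower x) with
      | some v => simp
      | none => exact ih (i + 1) d
  simp only [pvBestColumn]
  rw [hfold cols]
  calc (pvBestIdx (cols.foldl (fun d c => d.insert (PySem.Str.lower c) c) PySem.Dict.empty)
          0 cands).map (·.2)
      = (pvBestIdx (cols.foldl (fun d c => d.insert (PySem.Str.lower c) c) PySem.Dict.empty)
          0 (cands.map PySem.Str.lower)).map (·.2) := by rw [hl]
    _ = pvFindCand (cols.foldl (fun d c => d.insert (PySem.Str.lower c) c) PySem.Dict.empty)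
          cands := hfind cands 0 _

-- ===== VERDICT (by name: the statement is the Claim_ definition above) =====
theorem map_db_columns_spec : Claim_equal_map_db_columns := by
  intro cols _
  unfold Spec_map_db_columns
  simp only [map_db_columns, map_db_columns_alt]
  have hcands : ∀ fc ∈ pvCands, fc.2.map PySem.Str.lower = fc.2 ∧ fc.2.Nodup := by decide
  congr 1
  apply PySem.List.foldl_congr_mem
  intro acc fc hfc
  rw [bestColumn_eq_findCand fc.2 (hcands fc hfc).1 (hcands fc hfc).2 cols]
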